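-- pv_equiv track=rewrite | github.com/tomijais/facultad | data_structures_and_algoritms/homework5/two_knapsack.py | two_knapsack
-- ===== SOURCE A (Python) =====
-- def two_knapsack(items, K):
--     n = len(items)
--     dp = [[[0] * (K + 1) for i in range(K + 1)] for i in range(n + 1)]
--     choices = [[[0] * (K + 1) for i in range(K + 1)] for i in range(n + 1)]
--
--     for i in range(1, n + 1):
--         size_i, value_i = items[i - 1]
--         for k1 in range(K + 1):
--             for k2 in range(K + 1):
--                 dp[i][k1][k2] = dp[i - 1][k1][k2]
--                 choices[i][k1][k2] = 0
--                 max_val = dp[i][k1][k2]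
--
--                 if size_i <= k1:
--                     val = dp[i - 1][k1 - size_i][k2] + value_i
--                     if val > max_val:
--                         dp[i][k1][k2] = val
--                         choices[i][k1][k2] = 1
--                         max_val = val
--
--                 if size_i <= k2:
--                     val = dp[i - 1][k1][k2 - size_i] + value_i
--                     if val > max_val:
--                         dp[i][k1][k2] = val
--                         choices[i][k1][k2] = 2
--                         max_val = val
--
--     max_value = dp[n][K][K]
--
--     k1, k2 = K, K
--     knapsack1, knapsack2 = [], []
--     i = n
--     while i > 0:
--         choice = choices[i][k1][k2]
--         if choice == 0:
--             i -= 1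
--         elif choice == 1:
--             knapsack1.append(i - 1)
--             k1 -= items[i - 1][0]
--             i -= 1
--         elif choice == 2:
--             knapsack2.append(i - 1)
--             k2 -= items[i - 1][0]
--             i -= 1
--
--     knapsack1.reverse()
--     knapsack2.reverse()
--
--     return max_value, knapsack1, knapsack2
-- ===== SOURCE B (Python) =====
-- def two_knapsack(items, K):
--     # Each dp cell stores the full solution (value, sack1, sack2); one rolling
--     # layer, single forward pass, no choices table and no backtracking loop.
--     prev = [[(0, [], []) for _ in range(K + 1)] for _ in range(K + 1)]
--     for i, (s, v) in enumerate(items):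
--         cur = [[None] * (K + 1) for _ in range(K + 1)]
--         for k1 in range(K + 1):
--             for k2 in range(K + 1):
--                 best = prev[k1][k2]
--                 if s <= k1:
--                     w, a, b = prev[k1 - s][k2]
--                     if w + v > best[0]:
--                         best = (w + v, a + [i], b)
--                 if s <= k2:
--                     w, a, b = prev[k1][k2 - s]
--                     if w + v > best[0]:
--                         best = (w + v, a, b + [i])
--                 cur[k1][k2] = best
--         prev = cur
--     return prev[K][K]
-- ===== Notes on version B (the rewrite author's own statement) =====
-- stated objective: alternative
-- what changed: B eliminates A's choices table and the whole backward reconstruction loop: each dp cell of a single rolling layer stores the complete solution (value, sack1, sack2), so one forward pass yields the answer directly; it trades the 3D tables for larger cells.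
import Mathlib
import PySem

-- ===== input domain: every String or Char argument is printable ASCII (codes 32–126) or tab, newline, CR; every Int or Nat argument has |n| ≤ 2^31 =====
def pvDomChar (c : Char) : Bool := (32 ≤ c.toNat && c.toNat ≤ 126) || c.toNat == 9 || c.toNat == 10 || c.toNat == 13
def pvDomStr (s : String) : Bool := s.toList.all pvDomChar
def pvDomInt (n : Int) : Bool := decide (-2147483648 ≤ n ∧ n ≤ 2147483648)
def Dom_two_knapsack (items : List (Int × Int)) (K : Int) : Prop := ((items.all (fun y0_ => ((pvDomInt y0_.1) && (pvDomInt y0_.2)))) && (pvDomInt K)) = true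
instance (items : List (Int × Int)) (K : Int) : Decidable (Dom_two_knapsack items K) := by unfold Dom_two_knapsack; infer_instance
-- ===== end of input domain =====

-- B replaces A's value table + choices table + backward reconstruction loop by a
-- single forward pass whose dp cells store full solutions (value, sack1, sack2)
-- in one rolling layer (objective: alternative). 


-- ===== PORT A =====
-- one dp/choices cell for item (s,v) on top of layer `prev`: A's two guarded updates in order
def pvCellA (prev : Int → Int → Int) (s v k1 k2 : Int) : Int × Int :=
  let base := prev k1 k2
  let st1 : Int × Int :=
    if s ≤ k1 ∧ prev (k1 - s) k2 + v > base then (prev (k1 - s) k2 + v, 1) else (base, 0)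
  if s ≤ k2 ∧ prev k1 (k2 - s) + v > st1.1 then (prev k1 (k2 - s) + v, 2) else st1

-- dp layer of A for the prefix whose REVERSE is the argument (layer 0 is all zeros)
def pvDpA : List (Int × Int) → Int → Int → Int
  | [], _, _ => 0
  | (s, v) :: rest, k1, k2 => (pvCellA (pvDpA rest) s v k1 k2).1

-- A's while-loop, i = n..1, over the reversed item list; lists are built in the
-- decreasing index order of Python's appends and reversed by the caller
def pvBackA : List (Int × Int) → Int → Int → List Int × List Int
  | [], _, _ => ([], [])
  | (s, v) :: rest, k1, k2 =>
    let c := (pvCellA (pvDpA rest) s v k1 k2).2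
    if c = 0 then pvBackA rest k1 k2
    else if c = 1 then
      let p := pvBackA rest (k1 - s) k2
      ((rest.length : Int) :: p.1, p.2)
    else
      let p := pvBackA rest k1 (k2 - s)
      (p.1, (rest.length : Int) :: p.2)

def two_knapsack (items : List (Int × Int)) (K : Int) : Int × List Int × List Int :=
  let rev := items.reverse
  let p := pvBackA rev K K
  (pvDpA rev K K, p.1.reverse, p.2.reverse)

-- ===== PORT B =====
-- one cell of B's rolling layer: the best (value, sack1, sack2) triple, the two
-- guarded improvements tried in the same order, the item index appended on take
def pvCellB (prev : Int → Int → Int × List Int × List Int) (s v idx k1 k2 : Int) :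
    Int × List Int × List Int :=
  let best := prev k1 k2
  let best1 :=
    if s ≤ k1 ∧ (prev (k1 - s) k2).1 + v > best.1 then
      ((prev (k1 - s) k2).1 + v, (prev (k1 - s) k2).2.1 ++ [idx], (prev (k1 - s) k2).2.2)
    else best
  if s ≤ k2 ∧ (prev k1 (k2 - s)).1 + v > best1.1 then
    ((prev k1 (k2 - s)).1 + v, (prev k1 (k2 - s)).2.1, (prev k1 (k2 - s)).2.2 ++ [idx])
  else best1

-- B's single forward pass: fold the enumerated items, the state is one layer
def two_knapsack_alt (items : List (Int × Int)) (K : Int) : Int × List Int × List Int :=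
  (items.zipIdx.foldl
    (fun prev xi => fun k1 k2 => pvCellB prev xi.1.1 xi.1.2 (xi.2 : Int) k1 k2)
    (fun _ _ => (0, [], []))) K K

-- ===== PRECONDITION & SPEC =====
-- Pre_ excludes exactly the inputs where Python A raises IndexError: a negative
-- capacity K, or any item of negative size (dp[...][k1-size] is then out of range).
def Pre_two_knapsack (items : List (Int × Int)) (K : Int) : Prop :=
  0 ≤ K ∧ ∀ p ∈ items, 0 ≤ p.1
instance (items : List (Int × Int)) (K : Int) : Decidable (Pre_two_knapsack items K) := by
  unfold Pre_two_knapsack; infer_instance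

def pvWitness_two_knapsack : (List (Int × Int)) × Int := ([(1, 2), (2, 3), (1, 1)], 3)

def Spec_two_knapsack (items : List (Int × Int)) (K : Int) (out : Int × List Int × List Int) : Prop := out = two_knapsack_alt items K
instance (items : List (Int × Int)) (K : Int) (out : Int × List Int × List Int) : Decidable (Spec_two_knapsack items K out) := by unfold Spec_two_knapsack; infer_instance

-- ===== CLAIM (what is proved, stated in full; the proofs are below) =====
def Claim_equal_two_knapsack : Prop := ∀ (items : List (Int × Int)) (K : Int), Dom_two_knapsack items K → Pre_two_knapsack items K → Spec_two_knapsack items K (two_knapsack items K)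

-- ===== LEMMAS AND PROOFS =====

-- B's folded layer at a prefix L equals A's (value, reconstruction) at L.reverse
theorem pvSolve_eq (L : List (Int × Int)) : ∀ k1 k2,
    (L.zipIdx.foldl
      (fun prev xi => fun k1 k2 => pvCellB prev xi.1.1 xi.1.2 (xi.2 : Int) k1 k2)
      (fun _ _ => (0, [], []))) k1 k2 =
    (pvDpA L.reverse k1 k2,
     (pvBackA L.reverse k1 k2).1.reverse, (pvBackA L.reverse k1 k2).2.reverse) := by
  induction L using List.reverseRecOn with
  | nil => intro k1 k2; rfl
  | append_singleton M x ih =>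
    intro k1 k2
    obtain ⟨s, v⟩ := x
    rw [show (M ++ [(s, v)]).zipIdx = M.zipIdx ++ [((s, v), M.length)] by
          simp [List.zipIdx_append],
        List.foldl_append]
    have hF : (M.zipIdx.foldl
        (fun prev xi => fun k1 k2 => pvCellB prev xi.1.1 xi.1.2 (xi.2 : Int) k1 k2)
        (fun _ _ => (0, [], []))) =
        fun a b => (pvDpA M.reverse a b,
          (pvBackA M.reverse a b).1.reverse, (pvBackA M.reverse a b).2.reverse) :=
      funext fun a => funext fun b => ih a b
    rw [hF]
    simp only [List.foldl_cons, List.foldl_nil, List.reverse_append, List.reverse_singleton,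
      List.singleton_append]
    simp only [pvCellB, pvDpA, pvBackA, pvCellA]
    by_cases h1 : s ≤ k1 ∧ pvDpA M.reverse (k1 - s) k2 + v > pvDpA M.reverse k1 k2 <;>
      by_cases h2k : s ≤ k2 <;>
        simp only [h1, h2k, gt_iff_lt, true_and, false_and, if_pos, if_neg, not_false_iff] <;>
        split_ifs <;>
        simp_all [List.reverse_cons, List.length_reverse]

theorem two_knapsack_equal (items : List (Int × Int)) (K : Int) :
    two_knapsack items K = two_knapsack_alt items K := by
  simp [two_knapsack, two_knapsack_alt, pvSolve_eq]

-- ===== VERDICT (by name: the statement is the Claim_ definition above) =====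
theorem two_knapsack_spec : Claim_equal_two_knapsack := by
  intro items K _ _
  unfold Spec_two_knapsack
  exact two_knapsack_equal items K
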